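-- pv_equiv track=rewrite | github.com/cowlet/advent2024 | day4/day4_pt1.py | find_xmas_row
-- ===== SOURCE A (Python) =====
-- def find_xmas_row(s):
--     count = 0
--     xmas = "XMAS"
--     for i in range(len(s)):
--         if s[i:i+len(xmas)] == xmas:
--             count += 1
--             i = i+len(xmas)
--     return count
-- ===== SOURCE B (Python) =====
-- def find_xmas_row(s):
--     # "XMAS" has no self-overlap, so non-overlapping str.count equals the
--     # overlapping per-index count of the original loop.
--     return s.count("XMAS")
-- ===== Notes on version B (the rewrite author's own statement) =====
-- stated objective: idiomatic
-- what changed: Replaces the explicit index loop of per-index slice comparisons by a single s.count("XMAS"), valid because the pattern has no self-overlap so non-overlapping count equals the overlapping count.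
import Mathlib
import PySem

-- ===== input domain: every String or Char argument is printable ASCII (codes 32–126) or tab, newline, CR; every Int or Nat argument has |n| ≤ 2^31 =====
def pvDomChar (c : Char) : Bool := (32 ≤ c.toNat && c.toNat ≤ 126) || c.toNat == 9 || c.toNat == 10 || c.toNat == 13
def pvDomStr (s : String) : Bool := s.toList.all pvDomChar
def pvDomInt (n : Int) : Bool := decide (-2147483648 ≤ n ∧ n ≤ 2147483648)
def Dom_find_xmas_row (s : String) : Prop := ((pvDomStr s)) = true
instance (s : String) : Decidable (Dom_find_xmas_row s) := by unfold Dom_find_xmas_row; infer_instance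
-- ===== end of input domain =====

-- B replaces A's index loop of slice comparisons by a single s.count("XMAS") (valid because
-- "XMAS" has no self-overlap, so non-overlapping count = overlapping count); objective: idiomatic.

-- ===== PORT A =====
-- for i in range(len(s)): if s[i:i+len(xmas)] == xmas: count += 1
-- (the 'i = i+len(xmas)' in A's body is dead: range rebinds i on the next iteration)
def find_xmas_row (s : String) : Int :=
  let xmas : String := "XMAS"
  (PySem.List.pyRange 0 (PySem.Str.len s) 1).foldl
    (fun count i =>
      if PySem.Str.slice s (some i) (some (i + PySem.Str.len xmas)) == xmas then count + 1 else count)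
    0

-- ===== PORT B =====
def find_xmas_row_alt (s : String) : Int :=
  (PySem.Str.count s "XMAS" : Int)

-- ===== PRECONDITION & SPEC =====
def Spec_find_xmas_row (s : String) (out : Int) : Prop := out = find_xmas_row_alt s
instance (s : String) (out : Int) : Decidable (Spec_find_xmas_row s out) := by unfold Spec_find_xmas_row; infer_instance

-- ===== CLAIM (what is proved, stated in full; the proofs are below) =====
def Claim_equal_find_xmas_row : Prop := ∀ (s : String), Dom_find_xmas_row s → Spec_find_xmas_row s (find_xmas_row s)

-- ===== LEMMAS AND PROOFS =====

-- the pattern, as a list of chars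
def xmL : List Char := ['X', 'M', 'A', 'S']

-- A's overlapping per-index count, on the list side
def aCount (l : List Char) : Nat :=
  (List.range l.length).countP (fun i => xmL.isPrefixOf (l.drop i))

theorem aCount_nil : aCount [] = 0 := rfl

theorem aCount_cons_neg (h : Char) (t : List Char)
    (hne : xmL.isPrefixOf (h :: t) = false) : aCount (h :: t) = aCount t := by
  unfold aCount
  simp [List.range_succ_eq_map, hne, List.countP_map, Function.comp_def]

-- no self-overlap: an occurrence at index 0 excludes occurrences at indices 1..3
theorem aCount_xmas (r : List Char) :
    aCount ('X' :: 'M' :: 'A' :: 'S' :: r) = 1 + aCount r := by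
  unfold aCount
  have hlen : ('X' :: 'M' :: 'A' :: 'S' :: r).length = 4 + r.length := by simp; omega
  rw [hlen, List.range_add, List.countP_append, List.countP_map]
  have h4 : List.range 4 = [0,1,2,3] := by decide
  rw [h4]
  simp [xmL, List.isPrefixOf, Function.comp_def]
  apply List.countP_congr
  intro x _
  have : List.drop (4 + x) ('X' :: 'M' :: 'A' :: 'S' :: r) = List.drop x r := by
    rw [← List.drop_drop]
    rfl
  rw [this]

-- B's non-overlapping scan computes A's overlapping count
theorem go_eq_aCount (fuel : Nat) :
    ∀ (l : List Char) (acc : Nat), l.length ≤ fuel →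
      PySem.Chars.count.go xmL fuel l acc = acc + aCount l := by
  induction fuel with
  | zero =>
    intro l acc hl
    have : l = [] := List.eq_nil_of_length_eq_zero (Nat.le_zero.mp hl)
    subst this
    rw [PySem.Chars.count.go]
    simp [aCount_nil]
  | succ fuel ih =>
    intro l acc hl
    cases l with
    | nil => rw [PySem.Chars.count.go]; simp [aCount_nil]; omega
    | cons h t =>
      rw [PySem.Chars.count.go]
      by_cases hp : xmL.isPrefixOf (h :: t) = true
      · rw [if_pos hp]
        have hpre : xmL <+: (h :: t) := List.isPrefixOf_iff_prefix.mp hp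
        obtain ⟨r, hr⟩ := hpre
        have hr' : h :: t = 'X' :: 'M' :: 'A' :: 'S' :: r := by
          rw [← hr]; rfl
        have hdrop : (h :: t).drop xmL.length = r := by rw [hr']; rfl
        rw [hdrop]
        have hlen : r.length ≤ fuel := by
          have := congrArg List.length hr'
          simp at this hl; omega
        rw [ih r (acc+1) hlen, hr', aCount_xmas]
        omega
      · rw [if_neg hp]
        have hlen : t.length ≤ fuel := by simp at hl; omega
        rw [ih t acc hlen, aCount_cons_neg h t (by simp only [Bool.not_eq_true] at hp; exact hp)]

theorem bridgeB (s : String) : (PySem.Str.count s "XMAS" : Nat) = aCount s.toList := by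
  have hxm : "XMAS".toList = xmL := by decide
  rw [PySem.Str.count, hxm, PySem.Chars.count]
  rw [if_neg (by decide)]
  rw [go_eq_aCount s.toList.length s.toList 0 (le_refl _)]
  omega

-- A's slice test at index k is exactly "xmL is a prefix of drop k"
theorem cond_eq (s : String) (k : Nat) :
    (PySem.Str.slice s (some (k : Int)) (some ((k : Int) + 4)) == "XMAS") =
      xmL.isPrefixOf (s.toList.drop k) := by
  have h1 : ((k : Int) + 4) = (((k + 4 : Nat)) : Int) := by push_cast; ring
  have h2 : (PySem.Str.slice s (some (k : Int)) (some ((k : Int) + 4))).toList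
      = (s.toList.drop k).take 4 := by
    rw [h1, PySem.Str.toList_slice, PySem.Chars.slice_eq_listSlice]
    have := PySem.List.slice_natCast_add s.toList k 4
    simpa using this
  rw [Bool.eq_iff_iff, beq_iff_eq, List.isPrefixOf_iff_prefix, ← String.toList_inj, h2,
    List.prefix_iff_eq_take]
  show List.take 4 (List.drop k s.toList) = "XMAS".toList ↔
    xmL = List.take xmL.length (List.drop k s.toList)
  rw [show "XMAS".toList = xmL from by decide, show xmL.length = 4 from rfl, eq_comm]

theorem bridgeA (s : String) : find_xmas_row s = (aCount s.toList : Int) := by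
  unfold find_xmas_row
  rw [PySem.List.foldl_if_add_one, PySem.List.pyRange_one, List.countP_map]
  unfold aCount
  have hlen : ((PySem.Str.len s - 0).toNat) = s.toList.length := by
    rw [PySem.Str.len_eq]; omega
  rw [hlen]
  have : ∀ k : Nat,
      ((fun i => PySem.Str.slice s (some i) (some (i + PySem.Str.len "XMAS")) == "XMAS") ∘ (fun k : Nat => (0 : Int) + k)) k
        = xmL.isPrefixOf (s.toList.drop k) := by
    intro k
    simp only [Function.comp_def, zero_add]
    rw [show PySem.Str.len "XMAS" = 4 from by decide]
    exact cond_eq s k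
  have hc : List.countP
      ((fun i => PySem.Str.slice s (some i) (some (i + PySem.Str.len "XMAS")) == "XMAS") ∘ (fun k : Nat => (0 : Int) + k))
      (List.range s.toList.length)
      = List.countP (fun i => xmL.isPrefixOf (s.toList.drop i)) (List.range s.toList.length) := by
    apply List.countP_congr
    intro k _
    rw [this k]
  rw [hc]
  omega

-- ===== VERDICT (by name: the statement is the Claim_ definition above) =====
theorem find_xmas_row_spec : Claim_equal_find_xmas_row := by
  intro s _
  unfold Spec_find_xmas_row
  rw [bridgeA]
  unfold find_xmas_row_alt
  rw [bridgeB]
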